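-- pv_equiv track=rewrite | github.com/Conturing/forelle | ui/grid.py | fill_stream
-- ===== SOURCE A (Python) =====
-- from typing import Optional, Sequence, Iterable, Iterator, Dict, Tuple, List, Union
--
-- def fill_stream(stream: Sequence[int], sum: int, num: int) -> List:
--     result = list()
--     for value in stream:
--         sum -= value
--         num -= 1
--         result.append(value)
--
--     result += [sum // max(num, 1)] * max(num, 0)
--     return result
-- ===== SOURCE B (Python) =====
-- def _gather(chunk):
--     # balanced divide and conquer over the list: returns (copy of chunk, total of chunk)
--     n = len(chunk)
--     if n == 0:
--         return [], 0
--     if n == 1: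
--         return [chunk[0]], chunk[0]
--     mid = n // 2
--     left_part, left_sum = _gather(chunk[:mid])
--     right_part, right_sum = _gather(chunk[mid:])
--     return left_part + right_part, left_sum + right_sum
--
--
-- def _pad(value, count):
--     # padding block by balanced halving (depth O(log count))
--     if count <= 0:
--         return []
--     if count == 1:
--         return [value]
--     half = count // 2
--     return _pad(value, half) + _pad(value, count - half)
--
--
-- def fill_stream(stream, sum, num):
--     body, total = _gather(list(stream))
--     remaining = num - len(body)
--     if remaining <= 0:
--         return body
--     return body + _pad((sum - total) // remaining, remaining)
-- ===== Notes on version B (the rewrite author's own statement) =====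
-- stated objective: alternative
-- what changed: Replaces the fused left-to-right copy-and-accumulate loop and the multiplicative padding expression by balanced divide-and-conquer: a recursive split gathers (copy, total) of the stream by halves, and the padding block is built by recursive halving; correctness rests on order-independence of the sum and of concatenation.
import Mathlib
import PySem

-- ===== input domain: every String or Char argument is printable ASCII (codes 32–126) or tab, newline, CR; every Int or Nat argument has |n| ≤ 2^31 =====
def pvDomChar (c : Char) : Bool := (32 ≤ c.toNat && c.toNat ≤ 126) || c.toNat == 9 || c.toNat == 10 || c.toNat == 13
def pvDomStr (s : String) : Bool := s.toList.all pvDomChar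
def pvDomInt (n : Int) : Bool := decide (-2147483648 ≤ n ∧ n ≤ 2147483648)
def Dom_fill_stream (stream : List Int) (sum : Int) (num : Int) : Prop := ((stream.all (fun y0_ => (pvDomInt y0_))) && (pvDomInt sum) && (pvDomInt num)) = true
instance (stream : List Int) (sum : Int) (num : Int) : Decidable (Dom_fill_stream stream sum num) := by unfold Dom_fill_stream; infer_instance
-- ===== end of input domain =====

-- B replaces A's fused left-to-right copy loop and multiplicative padding by balanced
-- divide-and-conquer over the stream and over the padding count (alternative, not faster).

-- ===== PORT A =====
-- one fused loop mutating (sum, num, result), then the padding block appended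
def fill_stream (stream : List Int) (sum : Int) (num : Int) : List Int :=
  let st := stream.foldl
    (fun (acc : Int × Int × List Int) value =>
      (acc.1 - value, acc.2.1 - 1, acc.2.2 ++ [value]))
    (sum, num, [])
  st.2.2 ++ List.replicate (max st.2.1 0).toNat (PySem.Int.floordiv st.1 (max st.2.1 1))

-- ===== PORT B =====
-- balanced divide and conquer over the list: (copy of chunk, total of chunk);
-- chunk[0] is ported with pyGet?/getD 0, exact since that branch has the list nonempty
def fillGather (chunk : List Int) : List Int × Int :=
  let n : Int := chunk.length
  if n = 0 then ([], 0)
  else if n = 1 then (((PySem.List.pyGet? chunk 0).getD 0 :: []), (PySem.List.pyGet? chunk 0).getD 0)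
  else
    let mid := PySem.Int.floordiv n 2
    let l := fillGather (PySem.List.slice chunk none (some mid))
    let r := fillGather (PySem.List.slice chunk (some mid) none)
    (l.1 ++ r.1, l.2 + r.2)
termination_by chunk.length
decreasing_by
  · rename_i h0 h1
    have hc0 : ¬((chunk.length : Int) = 0) := h0
    have hc1 : ¬((chunk.length : Int) = 1) := h1
    have hb : PySem.Int.floordiv ((chunk.length : Int)) 2 = (chunk.length : Int) / 2 :=
      PySem.Int.floordiv_eq_ediv_of_pos (by omega)
    have hm : 0 ≤ PySem.Int.floordiv ((chunk.length : Int)) 2 := by rw [hb]; omega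
    have h3 : (PySem.Int.floordiv ((chunk.length : Int)) 2).toNat < chunk.length := by
      rw [hb]; omega
    rw [PySem.List.slice_to chunk hm]
    simp only [List.length_take]
    omega
  · rename_i h0 h1
    have hc0 : ¬((chunk.length : Int) = 0) := h0
    have hc1 : ¬((chunk.length : Int) = 1) := h1
    have hb : PySem.Int.floordiv ((chunk.length : Int)) 2 = (chunk.length : Int) / 2 :=
      PySem.Int.floordiv_eq_ediv_of_pos (by omega)
    have hm : 0 ≤ PySem.Int.floordiv ((chunk.length : Int)) 2 := by rw [hb]; omega
    have h3 : 1 ≤ (PySem.Int.floordiv ((chunk.length : Int)) 2).toNat := by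
      rw [hb]; omega
    rw [PySem.List.slice_from chunk hm]
    simp only [List.length_drop]
    omega

-- padding block by balanced halving
def fillPad (value : Int) (count : Int) : List Int :=
  if count ≤ 0 then []
  else if count = 1 then [value]
  else
    let half := PySem.Int.floordiv count 2
    fillPad value half ++ fillPad value (count - half)
termination_by count.toNat
decreasing_by
  · rename_i h0 h1
    have hb : PySem.Int.floordiv count 2 = count / 2 :=
      PySem.Int.floordiv_eq_ediv_of_pos (by omega)
    rw [hb]
    omega
  · rename_i h0 h1
    have hb : PySem.Int.floordiv count 2 = count / 2 :=
      PySem.Int.floordiv_eq_ediv_of_pos (by omega)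
    rw [hb]
    omega

def fill_stream_alt (stream : List Int) (sum : Int) (num : Int) : List Int :=
  let g := fillGather stream
  let remaining := num - g.1.length
  if remaining ≤ 0 then g.1
  else g.1 ++ fillPad (PySem.Int.floordiv (sum - g.2) remaining) remaining

-- ===== PRECONDITION & SPEC =====
def Spec_fill_stream (stream : List Int) (sum : Int) (num : Int) (out : List Int) : Prop := out = fill_stream_alt stream sum num
instance (stream : List Int) (sum : Int) (num : Int) (out : List Int) : Decidable (Spec_fill_stream stream sum num out) := by unfold Spec_fill_stream; infer_instance

-- ===== CLAIM (what is proved, stated in full; the proofs are below) =====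
def Claim_equal_fill_stream : Prop := ∀ (stream : List Int) (sum : Int) (num : Int), Dom_fill_stream stream sum num → Spec_fill_stream stream sum num (fill_stream stream sum num)

-- ===== LEMMAS AND PROOFS =====

theorem fillGather_eq (chunk : List Int) : fillGather chunk = (chunk, chunk.sum) := by
  fun_induction fillGather chunk with
  | case1 c n h =>
    have hc : (c.length : Int) = 0 := h
    have hnil : c = [] := by
      cases c with
      | nil => rfl
      | cons a t => simp at hc; omega
    simp [hnil]
  | case2 c n hne h1 =>
    have hc : (c.length : Int) = 1 := h1
    have hl : c.length = 1 := by omega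
    obtain ⟨x, hx⟩ := List.length_eq_one_iff.mp hl
    subst hx
    simp [PySem.List.pyGet?, PySem.List.pyIdx?]
  | case3 c n hne0 hne1 mid l r ihl ihr =>
    have hc0 : ¬((c.length : Int) = 0) := hne0
    have hc1 : ¬((c.length : Int) = 1) := hne1
    have hmid : mid = (c.length : Int) / 2 :=
      PySem.Int.floordiv_eq_ediv_of_pos (by omega)
    have hmn : 0 ≤ mid := by rw [hmid]; omega
    have hl' : l = (PySem.List.slice c none (some mid),
        (PySem.List.slice c none (some mid)).sum) := ihl
    have hr' : r = (PySem.List.slice c (some mid) none,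
        (PySem.List.slice c (some mid) none).sum) := ihr
    rw [hl', hr']
    rw [PySem.List.slice_to c hmn, PySem.List.slice_from c hmn]
    have hsplit : c.take mid.toNat ++ c.drop mid.toNat = c := List.take_append_drop _ _
    simp only [Prod.mk.injEq]
    constructor
    · exact hsplit
    · calc (c.take mid.toNat).sum + (c.drop mid.toNat).sum
          = (c.take mid.toNat ++ c.drop mid.toNat).sum := List.sum_append.symm
        _ = c.sum := by rw [hsplit]

theorem fillPad_eq_replicate (v k : Int) : fillPad v k = List.replicate k.toNat v := by
  fun_induction fillPad v k with
  | case1 k h =>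
    have hk : k.toNat = 0 := by omega
    simp [hk]
  | case2 h =>
    simp
  | case3 k hne0 hne1 half ih1 ih2 =>
    have hb : half = k / 2 := PySem.Int.floordiv_eq_ediv_of_pos (by omega)
    rw [ih1, ih2, ← List.replicate_add]
    congr 1
    omega

theorem fill_stream_foldl_char (stream : List Int) (s n : Int) (res : List Int) :
    stream.foldl
      (fun (acc : Int × Int × List Int) value =>
        (acc.1 - value, acc.2.1 - 1, acc.2.2 ++ [value]))
      (s, n, res)
    = (s - stream.sum, n - stream.length, res ++ stream) := by
  induction stream generalizing s n res with
  | nil => simp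
  | cons x xs ih =>
    simp [List.foldl, ih, List.sum_cons]
    constructor <;> [ring; (push_cast; ring)]

theorem fill_stream_alt_char (stream : List Int) (s n : Int) :
    fill_stream_alt stream s n
      = stream ++ List.replicate (max (n - stream.length) 0).toNat
          (PySem.Int.floordiv (s - stream.sum) (max (n - stream.length) 1)) := by
  simp only [fill_stream_alt, fillGather_eq]
  by_cases h : n - (stream.length : Int) ≤ 0
  · simp [h]
  · have h1 : max (n - (stream.length : Int)) 0 = n - stream.length := by omega
    have h2 : max (n - (stream.length : Int)) 1 = n - stream.length := by omega
    simp [h, h1, h2, fillPad_eq_replicate]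

-- ===== VERDICT (by name: the statement is the Claim_ definition above) =====
theorem fill_stream_spec : Claim_equal_fill_stream := by
  intro stream sum num _
  unfold Spec_fill_stream
  rw [fill_stream_alt_char]
  unfold fill_stream
  simp [fill_stream_foldl_char]
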